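-- pv_equiv track=rewrite | github.com/Maxvgrad/specializations_data_structures_algorithms | course_1_algorithmic_toolbox/week5_dynamic_programming1/4_longest_common_subsequence_of_two_sequences/lcs2.py | lcs2_naive_v0
-- ===== SOURCE A (Python) =====
-- def lcs2_naive_v0(a, b):
--     if len(a) == 0 or len(b) == 0:
--         return 0
--
--     arr_long = b
--     arr_short = a
--     if len(a) > len(b):
--         arr_long = a
--         arr_short = b
--
--     sequence_max = 0
--
--     for start_index in range(len(arr_long)):
--         arr_long_pointer = start_index
--         sequence = 0
--         arr_short_last_match_index = 0
--         while arr_long_pointer < len(arr_long):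
--             arr_short_pointer = arr_short_last_match_index
--             while arr_short_pointer < len(arr_short):
--                 if arr_long[arr_long_pointer] == arr_short[arr_short_pointer]:
--                     arr_short_last_match_index = arr_short_pointer + 1
--                     sequence += 1
--                     break
--                 arr_short_pointer += 1
--
--             arr_long_pointer += 1
--
--         if sequence > sequence_max:
--             sequence_max = sequence
--
--     return sequence_max
-- ===== SOURCE B (Python) =====
-- from bisect import bisect_left
--
--
-- def lcs2_naive_v0(a, b):
--     if not a or not b:
--         return 0
--     long_arr, short_arr = (a, b) if len(a) > len(b) else (b, a)
--     pos = {}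
--     for i, v in enumerate(short_arr):
--         pos.setdefault(v, []).append(i)
--     best = 0
--     n = len(long_arr)
--     for start in range(n):
--         threshold = 0
--         seq = 0
--         for j in range(start, n):
--             ps = pos.get(long_arr[j], ())
--             k = bisect_left(ps, threshold)
--             if k < len(ps):
--                 threshold = ps[k] + 1
--                 seq += 1
--         if seq > best:
--             best = seq
--     return best
-- ===== Notes on version B (the rewrite author's own statement) =====
-- stated objective: faster
-- what changed: B precomputes a dict mapping each value of the shorter sequence to its sorted list of indices and uses bisect to find the next match at-or-after the threshold, replacing A's inner linear rescan of the short array for every element of the long array.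
import Mathlib
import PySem

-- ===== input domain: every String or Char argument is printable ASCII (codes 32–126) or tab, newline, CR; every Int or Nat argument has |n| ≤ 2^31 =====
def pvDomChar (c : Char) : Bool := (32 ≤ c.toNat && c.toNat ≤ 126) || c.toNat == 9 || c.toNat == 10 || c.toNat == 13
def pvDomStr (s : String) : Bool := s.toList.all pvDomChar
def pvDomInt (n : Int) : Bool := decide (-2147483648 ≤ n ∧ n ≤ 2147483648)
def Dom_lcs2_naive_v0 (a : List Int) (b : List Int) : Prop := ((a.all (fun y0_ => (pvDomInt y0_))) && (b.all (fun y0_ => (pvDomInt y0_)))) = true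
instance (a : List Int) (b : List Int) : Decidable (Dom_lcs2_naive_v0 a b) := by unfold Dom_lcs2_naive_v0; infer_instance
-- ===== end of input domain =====

-- B replaces A's inner linear rescans of the short array with a precomputed
-- value -> sorted-index-list dict and bisect; measured asymptotically faster.

-- ===== PORT A =====
-- inner 'while arr_short_pointer < len(arr_short)' loop: returns the updated
-- arr_short_last_match_index (= matched index + 1) on a match, none otherwise
def pvScanShort (short : List Int) (x : Int) (ptr : Nat) : Option Nat :=
  if _h : ptr < short.length then
    if short.getD ptr 0 = x then some (ptr + 1)
    else pvScanShort short x (ptr + 1)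
  else none
termination_by short.length - ptr

-- middle 'while arr_long_pointer < len(arr_long)' loop carrying
-- (arr_short_last_match_index, sequence)
def pvScanLong (long short : List Int) (p : Nat) (t : Nat) (seq : Int) : Int :=
  if _h : p < long.length then
    match pvScanShort short (long.getD p 0) t with
    | some t' => pvScanLong long short (p + 1) t' (seq + 1)
    | none => pvScanLong long short (p + 1) t seq
  else seq
termination_by long.length - p

def lcs2_naive_v0 (a : List Int) (b : List Int) : Int :=
  if a.length = 0 || b.length = 0 then 0
  else
    let ls := if a.length > b.length then (a, b) else (b, a)
    (List.range ls.1.length).foldl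
      (fun mx start =>
        let s := pvScanLong ls.1 ls.2 start 0 0
        if s > mx then s else mx) 0

-- ===== PORT B =====
-- pos = {}; for i, v in enumerate(short_arr): pos.setdefault(v, []).append(i)
def pvBuildPos (short : List Int) : PySem.Dict Int (List Int) :=
  (PySem.List.enumerate short).foldl
    (fun d iv => d.insert iv.2 (d.getD iv.2 [] ++ [iv.1])) PySem.Dict.empty

def lcs2_naive_v0_alt (a : List Int) (b : List Int) : Int :=
  if a.length = 0 || b.length = 0 then 0
  else
    let ls := if a.length > b.length then (a, b) else (b, a)
    let pos := pvBuildPos ls.2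
    let n := ls.1.length
    (List.range n).foldl
      (fun best start =>
        -- for j in range(start, n): ported as List.range' start (n - start)
        let st := (List.range' start (n - start)).foldl
          (fun (st : Int × Int) j =>
            let ps := pos.getD (ls.1.getD j 0) []
            let k := PySem.List.bisectLeft ps st.1
            if hk : k < ps.length then (ps[k] + 1, st.2 + 1) else st) (0, 0)
        if st.2 > best then st.2 else best) 0

-- ===== PRECONDITION & SPEC =====
def Spec_lcs2_naive_v0 (a : List Int) (b : List Int) (out : Int) : Prop := out = lcs2_naive_v0_alt a b
instance (a : List Int) (b : List Int) (out : Int) : Decidable (Spec_lcs2_naive_v0 a b out) := by unfold Spec_lcs2_naive_v0; infer_instance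

-- ===== CLAIM (what is proved, stated in full; the proofs are below) =====
def Claim_equal_lcs2_naive_v0 : Prop := ∀ (a : List Int) (b : List Int), Dom_lcs2_naive_v0 a b → Spec_lcs2_naive_v0 a b (lcs2_naive_v0 a b)

-- ===== LEMMAS AND PROOFS =====

-- the list of (Int-cast) indices of short whose entry equals x, ascending
def pvOcc (short : List Int) (x : Int) : List Int :=
  ((PySem.List.enumerate short).filter (fun p => p.2 == x)).map (·.1)

theorem pvBuildPos_fold (l : List (Int × Int)) (x : Int) :
    ∀ d : PySem.Dict Int (List Int),
      (l.foldl (fun d iv => d.insert iv.2 (d.getD iv.2 [] ++ [iv.1])) d).getD x []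
        = d.getD x [] ++ ((l.filter (fun p => p.2 == x)).map (·.1)) := by
  induction l with
  | nil => simp
  | cons p l ih =>
    intro d
    simp only [List.foldl_cons, List.filter_cons]
    rw [ih]
    by_cases hx : p.2 = x
    · subst hx
      simp
    · have hb : (p.2 == x) = false := by simp [hx]
      simp [PySem.Dict.getD_insert, Ne.symm hx, hb]

theorem pvBuildPos_getD (short : List Int) (x : Int) :
    (pvBuildPos short).getD x [] = pvOcc short x := by
  unfold pvBuildPos pvOcc
  rw [pvBuildPos_fold]
  rfl

theorem pvOcc_mem {short : List Int} {x y : Int} (h : y ∈ pvOcc short x) :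
    ∃ i : Nat, y = (i : Int) ∧ i < short.length ∧ short.getD i 0 = x := by
  unfold pvOcc at h
  obtain ⟨p, hp, rfl⟩ := List.mem_map.mp h
  obtain ⟨hmem, hval⟩ := List.mem_filter.mp hp
  rw [PySem.List.mem_enumerate_iff] at hmem
  obtain ⟨k, hk, rfl⟩ := hmem
  refine ⟨k, by simp, hk, ?_⟩
  have := beq_iff_eq.mp hval
  simpa [List.getD_eq_getElem?_getD, List.getElem?_eq_getElem hk] using this

theorem pvOcc_mem_of (short : List Int) (x : Int) {i : Nat}
    (hi : i < short.length) (hx : short.getD i 0 = x) : (i : Int) ∈ pvOcc short x := by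
  unfold pvOcc
  have hval : short[i] = x := by
    simpa [List.getD_eq_getElem?_getD, List.getElem?_eq_getElem hi] using hx
  refine List.mem_map.mpr ⟨((i : Int), short[i]), List.mem_filter.mpr ⟨?_, ?_⟩, rfl⟩
  · exact (PySem.List.mem_enumerate_iff short 0 _).mpr ⟨i, hi, by simp⟩
  · simp [hval]

theorem pvOcc_sorted (short : List Int) (x : Int) :
    (pvOcc short x).Pairwise (· < ·) := by
  unfold pvOcc
  rw [List.pairwise_map]
  exact (PySem.List.pairwise_lt_enumerate short 0).filter _

theorem pvScanShort_eq_none (short : List Int) (x : Int) (t : Nat)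
    (h : ∀ i : Nat, t ≤ i → i < short.length → short.getD i 0 ≠ x) :
    pvScanShort short x t = none := by
  rw [pvScanShort]
  by_cases ht : t < short.length
  · have hne : ¬ short.getD t 0 = x := h t le_rfl ht
    simp only [ht, dite_true, hne, if_false]
    exact pvScanShort_eq_none short x (t + 1) (fun i h1 h2 => h i (Nat.le_of_succ_le h1) h2)
  · simp [ht]
termination_by short.length - t

theorem pvScanShort_eq_some (short : List Int) (x : Int) (t i0 : Nat)
    (h1 : t ≤ i0) (h2 : i0 < short.length) (h3 : short.getD i0 0 = x)
    (hmin : ∀ j : Nat, t ≤ j → j < short.length → short.getD j 0 = x → i0 ≤ j) :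
    pvScanShort short x t = some (i0 + 1) := by
  rw [pvScanShort]
  have ht : t < short.length := lt_of_le_of_lt h1 h2
  by_cases he : short.getD t 0 = x
  · have heq : i0 = t := le_antisymm (hmin t le_rfl ht he) h1
    have he' : short[t] = x := by
      simpa [List.getD_eq_getElem?_getD, List.getElem?_eq_getElem ht] using he
    simp [ht, he', heq]
  · have hne : t ≠ i0 := fun hh => he (hh ▸ h3)
    have h1' : t + 1 ≤ i0 := Nat.lt_of_le_of_ne h1 hne
    simp only [ht, dite_true, he, if_false]
    exact pvScanShort_eq_some short x (t + 1) i0 h1' h2 h3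
      (fun j ha hb hc => hmin j (Nat.le_of_succ_le ha) hb hc)
termination_by short.length - t

-- the bisect step on pvOcc computes exactly what A's inner scan computes
theorem pvStepKey (short : List Int) (x : Int) (t : Nat) :
    (if hk : PySem.List.bisectLeft (pvOcc short x) (t : Int) < (pvOcc short x).length
       then some ((pvOcc short x)[PySem.List.bisectLeft (pvOcc short x) (t : Int)] + 1)
       else none)
      = (pvScanShort short x t).map (fun m => (m : Int)) := by
  have hsorted : (pvOcc short x).Pairwise (· ≤ ·) := (pvOcc_sorted short x).imp le_of_lt
  obtain ⟨hkle, hlt, hge⟩ := PySem.List.bisectLeft_spec (pvOcc short x) (t : Int) hsorted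
  by_cases hk : PySem.List.bisectLeft (pvOcc short x) (t : Int) < (pvOcc short x).length
  · have hmemk : (pvOcc short x)[PySem.List.bisectLeft (pvOcc short x) (t : Int)] ∈ pvOcc short x :=
      List.getElem_mem hk
    obtain ⟨i0, hei, hilen, hival⟩ := pvOcc_mem hmemk
    have hti0 : t ≤ i0 := by
      have hx1 := hge _ hk le_rfl
      rw [hei] at hx1
      exact_mod_cast hx1
    have hmin : ∀ j : Nat, t ≤ j → j < short.length → short.getD j 0 = x → i0 ≤ j := by
      intro j hja hjb hjc
      have hjmem : (j : Int) ∈ pvOcc short x := pvOcc_mem_of short x hjb hjc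
      obtain ⟨idx, hidx, hidxeq⟩ := List.mem_iff_getElem.mp hjmem
      rcases lt_or_ge idx (PySem.List.bisectLeft (pvOcc short x) (t : Int)) with hcase | hcase
      · exfalso
        have hx2 := hlt idx hidx hcase
        rw [hidxeq] at hx2
        omega
      · have hle : (pvOcc short x)[PySem.List.bisectLeft (pvOcc short x) (t : Int)]
            ≤ (pvOcc short x)[idx] := by
          rcases Nat.lt_or_ge (PySem.List.bisectLeft (pvOcc short x) (t : Int)) idx with hlt2 | hge2
          · exact (List.pairwise_iff_getElem.mp hsorted) _ idx hk hidx hlt2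
          · have heqi : PySem.List.bisectLeft (pvOcc short x) (t : Int) = idx :=
              le_antisymm hcase hge2
            simp [heqi]
        rw [hidxeq, hei] at hle
        exact_mod_cast hle
    rw [pvScanShort_eq_some short x t i0 hti0 hilen hival hmin]
    simp only [hk, dite_true]
    rw [hei]
    rfl
  · have hnone : pvScanShort short x t = none := by
      apply pvScanShort_eq_none
      intro i hta htb hne
      have hjmem : (i : Int) ∈ pvOcc short x := pvOcc_mem_of short x htb hne
      obtain ⟨idx, hidx, hidxeq⟩ := List.mem_iff_getElem.mp hjmem
      have hik : idx < PySem.List.bisectLeft (pvOcc short x) (t : Int) :=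
        lt_of_lt_of_le hidx (le_of_not_gt hk)
      have hx3 := hlt idx hidx hik
      rw [hidxeq] at hx3
      omega
    simp [hk, hnone]

-- the middle loops agree, the threshold carried as the Nat-cast
theorem pvMid (long short : List Int) :
    ∀ (m p : Nat) (t : Nat) (seq : Int), long.length - p = m →
      ((List.range' p (long.length - p)).foldl
          (fun (st : Int × Int) j =>
            let ps := (pvBuildPos short).getD (long.getD j 0) []
            let k := PySem.List.bisectLeft ps st.1
            if hk : k < ps.length then (ps[k] + 1, st.2 + 1) else st)
          ((t : Int), seq)).2
        = pvScanLong long short p t seq := by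
  intro m
  induction m with
  | zero =>
    intro p t seq hm
    have hp : ¬ p < long.length := by omega
    rw [hm, pvScanLong]
    simp [hp]
  | succ m ih =>
    intro p t seq hm
    have hp : p < long.length := by omega
    have hrange : List.range' p (long.length - p) = p :: List.range' (p + 1) m := by
      rw [hm, List.range'_succ]
    rw [hrange]
    simp only [List.foldl_cons]
    rw [pvScanLong]
    simp only [hp, dite_true]
    have hkey := pvStepKey short (long.getD p 0) t
    have hm' : long.length - (p + 1) = m := by omega
    cases hscan : pvScanShort short (long.getD p 0) t with
    | none =>
      rw [hscan] at hkey
      have hk : ¬ PySem.List.bisectLeft (pvOcc short (long.getD p 0)) (t : Int)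
          < (pvOcc short (long.getD p 0)).length := by
        intro hc
        rw [dif_pos hc] at hkey
        simp at hkey
      rw [pvBuildPos_getD, dif_neg hk]
      have ih' := ih (p + 1) t seq hm'
      rw [hm'] at ih'
      exact ih'
    | some t' =>
      rw [hscan] at hkey
      have hk : PySem.List.bisectLeft (pvOcc short (long.getD p 0)) (t : Int)
          < (pvOcc short (long.getD p 0)).length := by
        by_contra hc
        rw [dif_neg hc] at hkey
        simp at hkey
      have hval : (pvOcc short (long.getD p 0))[PySem.List.bisectLeft
          (pvOcc short (long.getD p 0)) (t : Int)]'hk + 1 = ((t' : Nat) : Int) := by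
        rw [dif_pos hk] at hkey
        simpa using hkey
      rw [pvBuildPos_getD, dif_pos hk, hval]
      have ih' := ih (p + 1) t' (seq + 1) hm'
      rw [hm'] at ih'
      exact ih'

-- the outer loops agree
theorem pvOuter (long short : List Int) :
    (List.range long.length).foldl
        (fun mx start =>
          let s := pvScanLong long short start 0 0
          if s > mx then s else mx) 0
      = (List.range long.length).foldl
          (fun best start =>
            let st := (List.range' start (long.length - start)).foldl
              (fun (st : Int × Int) j =>
                let ps := (pvBuildPos short).getD (long.getD j 0) []
                let k := PySem.List.bisectLeft ps st.1
                if hk : k < ps.length then (ps[k] + 1, st.2 + 1) else st) (0, 0)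
            if st.2 > best then st.2 else best) 0 := by
  apply PySem.List.foldl_congr_mem
  intro acc start _
  have h := pvMid long short (long.length - start) start 0 0 rfl
  simp only [Nat.cast_zero] at h
  simp only [gt_iff_lt]
  rw [← h]

-- ===== VERDICT (by name: the statement is the Claim_ definition above) =====
theorem lcs2_naive_v0_spec : Claim_equal_lcs2_naive_v0 := by
  intro a b _
  unfold Spec_lcs2_naive_v0 lcs2_naive_v0 lcs2_naive_v0_alt
  exact if_congr Iff.rfl rfl
    (pvOuter (if a.length > b.length then (a, b) else (b, a)).1
             (if a.length > b.length then (a, b) else (b, a)).2)
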